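-- pv_equiv track=rewrite | github.com/rouault/mapproxy | mapproxy/source/ogcapitiles.py | _find_href_in_links
-- ===== SOURCE A (Python) =====
-- def _find_href_in_links(links, rel, preferred_media_type):
--     href = None
--     for link in links:
--         if link["rel"] == rel:
--             if "type" in link and link["type"] == preferred_media_type:
--                 href = link["href"]
--                 break
--             elif "type" not in link:
--                 if href is None:
--                     href = link["href"]
--     return href
-- ===== SOURCE B (Python) =====
-- def _find_href_in_links(links, rel, preferred_media_type):
--     # Pass 1: first link matching rel with an explicit preferred media type.
--     for link in links:
--         if link["rel"] == rel and "type" in link and link["type"] == preferred_media_type: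
--             return link["href"]
--     # Pass 2: first link matching rel with no media type at all.
--     for link in links:
--         if link["rel"] == rel and "type" not in link:
--             return link["href"]
--     return None
-- ===== Notes on version B (the rewrite author's own statement) =====
-- stated objective: simpler
-- what changed: Replaces the single stateful loop with its None-latched href accumulator and break by two sequential early-return scans: first for a rel link with the preferred media type, then for a rel link with no type key.
-- outside the precondition, e.g. on _find_href_in_links([{'rel': 'r', 'type': 't', 'href': 'h'}, {'foo': 'x'}], 'r', 't'): A returns 'h', B returns 'h'; on _find_href_in_links([{'rel': 'r', 'href': 'h'}, {'rel': 'r'}], 'r', 't'): A returns 'h', B returns 'h'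
import Mathlib
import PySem

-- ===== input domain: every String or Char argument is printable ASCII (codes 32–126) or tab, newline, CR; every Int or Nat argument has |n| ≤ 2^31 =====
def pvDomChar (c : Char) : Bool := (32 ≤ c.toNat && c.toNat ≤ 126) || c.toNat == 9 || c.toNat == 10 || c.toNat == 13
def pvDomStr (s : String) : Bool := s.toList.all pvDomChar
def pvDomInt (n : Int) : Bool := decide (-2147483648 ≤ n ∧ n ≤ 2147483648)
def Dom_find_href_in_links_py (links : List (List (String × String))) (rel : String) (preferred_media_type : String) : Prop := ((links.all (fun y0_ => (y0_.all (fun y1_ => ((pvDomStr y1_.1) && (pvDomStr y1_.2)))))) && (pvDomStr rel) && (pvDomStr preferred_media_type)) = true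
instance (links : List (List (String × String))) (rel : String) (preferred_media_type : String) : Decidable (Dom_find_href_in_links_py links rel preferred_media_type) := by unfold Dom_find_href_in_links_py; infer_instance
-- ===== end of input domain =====

-- B replaces A's single stateful loop (None-latched href accumulator + break) by two
-- sequential early-return scans: simpler, same O(n) cost.


-- shared predicates: link["rel"] == rel, the typed-match test, the untyped-match test
-- (dict lookup = first match in the association list; List.lookup is exactly that)
def relMatch (rel : String) (link : List (String × String)) : Bool :=
  link.lookup "rel" == some rel

def typedMatch (rel preferred_media_type : String) (link : List (String × String)) : Bool :=
  relMatch rel link && (link.lookup "type").isSome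
    && (link.lookup "type" == some preferred_media_type)

def untypedMatch (rel : String) (link : List (String × String)) : Bool :=
  relMatch rel link && !(link.lookup "type").isSome

-- ===== PORT A =====
-- A's loop, with href the accumulator; link["k"] is ported as List.lookup "k"
-- (none on a missing key = Python KeyError; Pre_ below guarantees the keys are present).
def aLoop (rel preferred_media_type : String) :
    List (List (String × String)) → Option String → Option String
  | [], href => href
  | link :: rest, href =>
    if relMatch rel link then
      if (link.lookup "type").isSome && (link.lookup "type" == some preferred_media_type) then
        link.lookup "href"          -- href = link["href"]; break
      else if !(link.lookup "type").isSome then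
        aLoop rel preferred_media_type rest
          (if href.isNone then link.lookup "href" else href)
      else aLoop rel preferred_media_type rest href
    else aLoop rel preferred_media_type rest href

def find_href_in_links_py (links : List (List (String × String))) (rel : String) (preferred_media_type : String) : Option String :=
  aLoop rel preferred_media_type links none

-- ===== PORT B =====
def find_href_in_links_py_alt (links : List (List (String × String))) (rel : String) (preferred_media_type : String) : Option String :=
  match links.find? (typedMatch rel preferred_media_type) with
  | some link => link.lookup "href"
  | none =>
    match links.find? (untypedMatch rel) with
    | some link => link.lookup "href"
    | none => none

-- ===== PRECONDITION & SPEC =====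
-- Pre_ excludes inputs on which a link is missing the "rel" key, or a rel-matching link
-- (typed with the preferred type, or untyped) is missing the "href" key: there the Python
-- raises KeyError, except in shadowed corners (after A's break, or a non-first match)
-- where both programs still return the same value.
def Pre_find_href_in_links_py (links : List (List (String × String))) (rel : String) (preferred_media_type : String) : Prop :=
  ∀ link ∈ links, (link.lookup "rel").isSome = true ∧
    ((typedMatch rel preferred_media_type link || untypedMatch rel link) = true →
      (link.lookup "href").isSome = true)
instance (links : List (List (String × String))) (rel : String) (preferred_media_type : String) : Decidable (Pre_find_href_in_links_py links rel preferred_media_type) := by unfold Pre_find_href_in_links_py; infer_instance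

def pvWitness_find_href_in_links_py : (List (List (String × String))) × String × String :=
  ([[("rel", "r"), ("href", "h")], [("rel", "r"), ("type", "t"), ("href", "g")]], "r", "t")

def Spec_find_href_in_links_py (links : List (List (String × String))) (rel : String) (preferred_media_type : String) (out : Option String) : Prop := out = find_href_in_links_py_alt links rel preferred_media_type
instance (links : List (List (String × String))) (rel : String) (preferred_media_type : String) (out : Option String) : Decidable (Spec_find_href_in_links_py links rel preferred_media_type out) := by unfold Spec_find_href_in_links_py; infer_instance

-- ===== CLAIM (what is proved, stated in full; the proofs are below) =====
def Claim_equal_find_href_in_links_py : Prop := ∀ (links : List (List (String × String))) (rel : String) (preferred_media_type : String), Dom_find_href_in_links_py links rel preferred_media_type → Pre_find_href_in_links_py links rel preferred_media_type → Spec_find_href_in_links_py links rel preferred_media_type (find_href_in_links_py links rel preferred_media_type)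

-- ===== LEMMAS AND PROOFS =====

-- Invariant of A's loop: it returns the first typed match's href if one exists,
-- otherwise the latched accumulator, otherwise the first untyped match's href.
lemma aLoop_eq (rel pmt : String) :
    ∀ (links : List (List (String × String))),
      (∀ link ∈ links,
        (typedMatch rel pmt link || untypedMatch rel link) = true →
          (link.lookup "href").isSome = true) →
      ∀ (href : Option String),
        aLoop rel pmt links href =
          match links.find? (typedMatch rel pmt) with
          | some link => link.lookup "href"
          | none =>
            match href with
            | some h => some h
            | none => (links.find? (untypedMatch rel)).bind (fun link => link.lookup "href")
  | [], _, href => by cases href <;> simp [aLoop]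
  | link :: rest, hpre, href => by
    have hrest : ∀ l ∈ rest,
        (typedMatch rel pmt l || untypedMatch rel l) = true →
          (l.lookup "href").isSome = true :=
      fun l hl => hpre l (List.mem_cons_of_mem _ hl)
    have ih := aLoop_eq rel pmt rest hrest
    by_cases hr : relMatch rel link
    · by_cases ht : ((link.lookup "type").isSome && (link.lookup "type" == some pmt)) = true
      · have htm : typedMatch rel pmt link = true := by
          simp [typedMatch, hr]; simpa using ht
        simp [aLoop, hr, ht, List.find?, htm]
      · have htm : typedMatch rel pmt link = false := by
          simp only [typedMatch]
          cases h1 : (link.lookup "type").isSome <;>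
            cases h2 : (link.lookup "type" == some pmt) <;>
              simp_all [relMatch]
        by_cases hu : (link.lookup "type").isSome
        · -- rel matches, has a type but not the preferred one: skipped entirely
          have hum : untypedMatch rel link = false := by simp [untypedMatch, hu]
          simp [aLoop, hr, hu, ih, List.find?, htm, hum]
          intro h
          exact absurd (by simp [hu, h]) ht
        · -- untyped rel match
          have hum : untypedMatch rel link = true := by simp [untypedMatch, hr, hu]
          have hh : (link.lookup "href").isSome = true := by
            exact hpre link (List.mem_cons_self) (by simp [hum])
          obtain ⟨v, hv⟩ := Option.isSome_iff_exists.mp hh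
          cases href with
          | none =>
            simp [aLoop, hr, hu, ih, List.find?, htm, hum, hv]
          | some h =>
            simp [aLoop, hr, hu, ih, List.find?, htm]
    · have htm : typedMatch rel pmt link = false := by simp [typedMatch, hr]
      have hum : untypedMatch rel link = false := by simp [untypedMatch, hr]
      simp [aLoop, hr, ih, List.find?, htm, hum]

-- ===== VERDICT (by name: the statement is the Claim_ definition above) =====
theorem find_href_in_links_py_spec : Claim_equal_find_href_in_links_py := by
  intro links rel pmt _hdom hpre
  unfold Spec_find_href_in_links_py find_href_in_links_py find_href_in_links_py_alt
  rw [aLoop_eq rel pmt links (fun l hl => (hpre l hl).2)]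
  cases links.find? (typedMatch rel pmt) with
  | some l => rfl
  | none =>
    cases hfu : links.find? (untypedMatch rel) with
    | none => rfl
    | some l =>
      have hl : l ∈ links := List.mem_of_find?_eq_some hfu
      have hum : untypedMatch rel l = true := List.find?_some hfu
      have hh := (hpre l hl).2 (by simp [hum])
      obtain ⟨v, hv⟩ := Option.isSome_iff_exists.mp hh
      simp [hv]
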